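-- pv_equiv track=rewrite | github.com/ladislav-lettovsky/ai-project-template | scripts/lint_spec.py | duplicate_requirement_errors
-- ===== SOURCE A (Python) =====
-- from collections.abc import Iterable
--
-- def duplicate_requirement_errors(requirements: Iterable[str]) -> list[str]:
--     """Return one duplicate-ID error per duplicated requirement, in order."""
--     seen: set[str] = set()
--     reported: set[str] = set()
--     errors: list[str] = []
--     for req in requirements:
--         if req in seen and req not in reported:
--             errors.append(f"requirement '{req}' is declared more than once")
--             reported.add(req)
--         seen.add(req)
--     return errors
-- ===== SOURCE B (Python) =====
-- from collections.abc import Iterable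
--
-- def duplicate_requirement_errors(requirements: Iterable[str]) -> list[str]:
--     """Return one duplicate-ID error per duplicated requirement, in order."""
--     reqs = list(requirements)
--     return [f"requirement '{r}' is declared more than once"
--             for i, r in enumerate(reqs)
--             if reqs[:i].count(r) == 1]
-- ===== Notes on version B (the rewrite author's own statement) =====
-- stated objective: simpler
-- what changed: Replaces the streaming loop with mutable seen/reported sentinel sets by a single comprehension over enumerate(reqs) that emits the message exactly at each element whose preceding prefix contains it exactly once (its second occurrence).
import Mathlib
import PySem

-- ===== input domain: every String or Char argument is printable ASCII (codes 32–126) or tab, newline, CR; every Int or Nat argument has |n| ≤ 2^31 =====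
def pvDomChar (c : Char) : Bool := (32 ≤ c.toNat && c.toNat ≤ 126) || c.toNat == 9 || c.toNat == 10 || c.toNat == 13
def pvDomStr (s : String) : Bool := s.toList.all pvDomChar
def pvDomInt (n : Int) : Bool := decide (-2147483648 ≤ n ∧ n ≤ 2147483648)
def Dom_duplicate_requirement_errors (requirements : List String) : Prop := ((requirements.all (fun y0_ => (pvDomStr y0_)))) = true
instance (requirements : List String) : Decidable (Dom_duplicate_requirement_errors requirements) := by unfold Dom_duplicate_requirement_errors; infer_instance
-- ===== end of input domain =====

-- B replaces A's streaming seen/reported sentinel sets by a single comprehension that keeps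
-- exactly the second occurrences (prefix count == 1); objective: simpler, not faster.

-- ===== PORT A =====
-- f"requirement '{req}' is declared more than once" (shared by both ports; identical f-string in both Pythons)
def pvMsg (req : String) : String := "requirement '" ++ req ++ "' is declared more than once"

-- the 'for req in requirements' loop with state (seen, reported, errors)
def pvLoopA : List String → PySem.Set String → PySem.Set String → List String → List String
  | [], _, _, errors => errors
  | req :: rest, seen, reported, errors =>
    if PySem.Set.contains seen req && !(PySem.Set.contains reported req) then
      pvLoopA rest (PySem.Set.add seen req) (PySem.Set.add reported req) (errors ++ [pvMsg req])
    else
      pvLoopA rest (PySem.Set.add seen req) reported errors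

def duplicate_requirement_errors (requirements : List String) : List String :=
  pvLoopA requirements PySem.Set.empty PySem.Set.empty []

-- ===== PORT B =====
-- [msg for i, r in enumerate(reqs) if reqs[:i].count(r) == 1]
def duplicate_requirement_errors_alt (requirements : List String) : List String :=
  ((PySem.List.enumerate requirements).filter
      (fun p => (PySem.List.slice requirements none (some p.1)).count p.2 == 1)).map
    (fun p => pvMsg p.2)

-- ===== PRECONDITION & SPEC =====
def Spec_duplicate_requirement_errors (requirements : List String) (out : List String) : Prop := out = duplicate_requirement_errors_alt requirements
instance (requirements : List String) (out : List String) : Decidable (Spec_duplicate_requirement_errors requirements out) := by unfold Spec_duplicate_requirement_errors; infer_instance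

-- ===== CLAIM (what is proved, stated in full; the proofs are below) =====
def Claim_equal_duplicate_requirement_errors : Prop := ∀ (requirements : List String), Dom_duplicate_requirement_errors requirements → Spec_duplicate_requirement_errors requirements (duplicate_requirement_errors requirements)

-- ===== LEMMAS AND PROOFS =====

-- common recursive form: emit the message at each element whose preceding prefix holds it exactly once
def pvB : List String → List String → List String
  | _, [] => []
  | pre, r :: rest => (if pre.count r = 1 then [pvMsg r] else []) ++ pvB (pre ++ [r]) rest

theorem pvB_eq_alt (full : List String) :
    ∀ rest (k : Nat), full.drop k = rest →
      ((PySem.List.enumerate rest (k : Int)).filter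
          (fun p => (PySem.List.slice full none (some p.1)).count p.2 == 1)).map
        (fun p => pvMsg p.2) = pvB (full.take k) rest := by
  intro rest
  induction rest with
  | nil => intro k _; simp [PySem.List.enumerate, pvB]
  | cons r rest ih =>
    intro k hk
    have hklt : k < full.length := by
      by_contra h
      simp [List.drop_eq_nil_of_le (Nat.le_of_not_lt h)] at hk
    have hget? : full[k]? = some r := by
      rw [← List.head?_drop, hk]; rfl
    have htake : full.take (k + 1) = full.take k ++ [r] := by
      rw [List.take_add_one, hget?]; rfl
    have hdrop : full.drop (k + 1) = rest := by
      rw [← List.tail_drop, hk]; rfl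
    have hrec := ih (k + 1) hdrop
    have hcast : ((k : Int) + 1) = ((k + 1 : Nat) : Int) := by push_cast; ring
    rw [PySem.List.enumerate_cons, List.filter_cons]
    simp only [PySem.List.slice_to_natCast]
    by_cases hc : (full.take k).count r = 1
    · simp [pvB, hc]
      rw [hcast, hrec, htake]
    · have hbeq : (((full.take k).count r == 1) = false) := by simpa using hc
      simp [pvB, hbeq, hc]
      rw [hcast, hrec, htake]

theorem pvLoopA_eq_pvB :
    ∀ rest (pre : List String) (seen reported : PySem.Set String) (errors : List String),
      (∀ x, x ∈ seen ↔ x ∈ pre) →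
      (∀ x, x ∈ reported ↔ 2 ≤ pre.count x) →
      pvLoopA rest seen reported errors = errors ++ pvB pre rest := by
  intro rest
  induction rest with
  | nil => intro pre seen reported errors _ _; simp [pvLoopA, pvB]
  | cons req rest ih =>
    intro pre seen reported errors hseen hrep
    have hseenb : PySem.Set.contains seen req = decide (req ∈ pre) := by
      simp [PySem.Set.contains, hseen]
    have hrepb : PySem.Set.contains reported req = decide (2 ≤ pre.count req) := by
      simp [PySem.Set.contains, hrep]
    rw [pvLoopA, hseenb, hrepb]
    by_cases hc : pre.count req = 1
    · have hmem : req ∈ pre := List.count_pos_iff.mp (by omega)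
      have hnr : ¬ 2 ≤ pre.count req := by omega
      simp only [decide_eq_true hmem, decide_eq_false hnr, Bool.not_false, Bool.and_true]
      rw [ih (pre ++ [req]) _ _ _ ?_ ?_]
      · rw [pvB, if_pos hc]; simp
      · intro x
        rw [PySem.Set.mem_add, hseen x]
        simp [List.mem_append]
      · intro x
        rw [PySem.Set.mem_add, hrep x, List.count_append]
        by_cases hx : x = req
        · subst hx; simp [hc]
        · have hif : List.count x [req] = 0 := by
            simp [List.count_singleton]; exact fun h => hx h.symm
          rw [hif]
          simp [hx]
    · have hcond : (decide (req ∈ pre) && !decide (2 ≤ pre.count req)) = false := by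
        by_cases hm : req ∈ pre
        · have : 2 ≤ pre.count req := by
            have := List.count_pos_iff.mpr hm
            omega
          simp [this]
        · simp [hm]
      rw [hcond, if_neg Bool.false_ne_true]
      rw [ih (pre ++ [req]) _ _ _ ?_ ?_]
      · rw [pvB, if_neg hc]; simp
      · intro x
        rw [PySem.Set.mem_add, hseen x]
        simp [List.mem_append]
      · intro x
        rw [hrep x, List.count_append]
        by_cases hx : x = req
        · subst hx
          by_cases hm : x ∈ pre
          · have h1 : 1 ≤ pre.count x := List.count_pos_iff.mpr hm
            have h2 : 2 ≤ pre.count x := by omega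
            have hcnt : List.count x [x] = 1 := by simp
            rw [hcnt]
            omega
          · have h0 : pre.count x = 0 := List.count_eq_zero.mpr hm
            simp [h0]
        · have hif : List.count x [req] = 0 := by
            simp [List.count_singleton]; exact fun h => hx h.symm
          rw [hif]
          simp

-- ===== VERDICT (by name: the statement is the Claim_ definition above) =====
theorem duplicate_requirement_errors_spec : Claim_equal_duplicate_requirement_errors := by
  intro reqs _
  unfold Spec_duplicate_requirement_errors duplicate_requirement_errors duplicate_requirement_errors_alt
  rw [pvLoopA_eq_pvB reqs [] PySem.Set.empty PySem.Set.empty []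
      (by intro x; simp [PySem.Set.empty]) (by intro x; simp [PySem.Set.empty])]
  have := pvB_eq_alt reqs reqs 0 rfl
  simp only [Nat.cast_zero] at this
  simp [this]
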